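-- pv_equiv track=rewrite | github.com/yoonmyunghoon/JDI | 알고리즘/프로그래머스/코딩테스트 고득점 Kit/스택_큐/프린터.py | solution
-- ===== SOURCE A (Python) =====
-- def solution(priorities, location):
--     length = len(priorities)
--     check = [0]*length
--     now_max = max(priorities)
--     prior_check = [0]*10
--     for p in priorities:
--         prior_check[p] += 1
--
--     cnt = 0
--     idx = 0
--     while 1:
--         if cnt == length:
--             break
--         if check[idx] == 0:
--             if priorities[idx] == now_max:
--                 cnt += 1
--                 check[idx] = cnt
--                 if cnt == length:
--                     break
--                 prior_check[now_max] -= 1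
--                 while 1:
--                     if prior_check[now_max] != 0:
--                         break
--                     now_max -= 1
--         idx += 1
--         idx %= length
--     return check[location]
-- ===== SOURCE B (Python) =====
-- def solution(priorities, location):
--     q = list(enumerate(priorities))
--     order = 0
--     while q:
--         m = max(p for _, p in q)
--         j = next(k for k, (_, p) in enumerate(q) if p == m)
--         i = q[j][0]
--         order += 1
--         if i == location:
--             return order
--         q = q[j + 1:] + q[:j]
-- ===== Notes on version B (the rewrite author's own statement) =====
-- stated objective: idiomatic
-- what changed: B replaces A's circular index scan over a check/print-order array with digit-bucket counters by the textbook queue simulation: keep a list of (original_index, priority) pairs, each round jump to the first maximal-priority element, count it as printed and rotate the skipped prefix to the back, returning the counter when the target index prints.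
-- outside the precondition, e.g. on solution([5], -1): A returns 1, B returns None; on solution([9, -1], 0): A does not finish within the time limit, B returns 1
import Mathlib
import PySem

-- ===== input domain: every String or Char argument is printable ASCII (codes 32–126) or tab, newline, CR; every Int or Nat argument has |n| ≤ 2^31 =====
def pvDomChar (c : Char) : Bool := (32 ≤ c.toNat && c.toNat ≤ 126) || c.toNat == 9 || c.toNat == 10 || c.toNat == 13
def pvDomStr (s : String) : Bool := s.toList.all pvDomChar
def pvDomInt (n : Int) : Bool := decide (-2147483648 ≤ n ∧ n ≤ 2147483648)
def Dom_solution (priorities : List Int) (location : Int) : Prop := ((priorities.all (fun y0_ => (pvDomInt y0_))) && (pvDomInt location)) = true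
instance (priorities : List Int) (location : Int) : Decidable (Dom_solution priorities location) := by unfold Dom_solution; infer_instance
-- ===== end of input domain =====

-- B re-implements A's circular index scan (check array + digit counters) as the textbook
-- printer-queue simulation on a list of (index, priority) pairs; same return value on the
-- natural domain (single-digit priorities, valid location), stated by Pre_solution below.

-- ===== PORT A =====
-- inner `while 1: if prior_check[now_max] != 0: break` / `now_max -= 1` descent;
-- fuel-bounded (30 steps suffice on the admitted domain where 0 ≤ now_max ≤ 9);
-- pyGet? none = Python IndexError (excluded by Pre_solution)
def solInner (priorCheck : List Int) (nowMax : Int) (fuel : Nat) : Int :=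
  match fuel with
  | 0 => nowMax
  | fuel + 1 =>
    match PySem.List.pyGet? priorCheck nowMax with
    | none => nowMax
    | some v => if v ≠ 0 then nowMax else solInner priorCheck (nowMax - 1) fuel

-- outer `while 1` loop of A, fuel-bounded ((n+1)^2 steps suffice on the admitted domain)
def solLoop (priorities : List Int) (length : Int) (check priorCheck : List Int)
    (cnt idx nowMax : Int) (fuel : Nat) : List Int :=
  match fuel with
  | 0 => check
  | fuel + 1 =>
    if cnt = length then check
    else if PySem.List.pyGetD check idx 0 = 0 then
      if PySem.List.pyGetD priorities idx 0 = nowMax then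
        let cnt' := cnt + 1
        let check' := PySem.List.pySetD check idx cnt'
        if cnt' = length then check'
        else
          let pc' := PySem.List.pySetD priorCheck nowMax (PySem.List.pyGetD priorCheck nowMax 0 - 1)
          let nm' := solInner pc' nowMax 30
          solLoop priorities length check' pc' cnt' (PySem.Int.mod (idx + 1) length) nm' fuel
      else solLoop priorities length check priorCheck cnt (PySem.Int.mod (idx + 1) length) nowMax fuel
    else solLoop priorities length check priorCheck cnt (PySem.Int.mod (idx + 1) length) nowMax fuel

def solution (priorities : List Int) (location : Int) : Int :=
  let length : Int := priorities.length
  let check : List Int := List.replicate priorities.length 0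
  let nowMax : Int := (PySem.List.max? priorities (fun x => x)).getD 0
  let priorCheck : List Int := priorities.foldl
    (fun pc p => PySem.List.pySetD pc p (PySem.List.pyGetD pc p 0 + 1)) (List.replicate 10 0)
  let final := solLoop priorities length check priorCheck 0 0 nowMax
    ((priorities.length + 1) * (priorities.length + 1))
  PySem.List.pyGetD final location 0

-- ===== PORT B =====
-- `while q:` loop of Source B, fuel-bounded (n+1 steps suffice: the queue loses one pair per
-- round); returns 0 where Python B falls through returning None (excluded by Pre_solution)
def bLoop (q : List (Int × Int)) (location order : Int) (fuel : Nat) : Int :=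
  match fuel with
  | 0 => 0
  | fuel + 1 =>
    if q.isEmpty then 0
    else
      match PySem.List.max? (q.map Prod.snd) (fun y => y) with
      | none => 0
      | some m =>
        let j := q.findIdx (fun e => e.2 == m)
        let i := (q.getD j (0, 0)).1
        let order' := order + 1
        if i = location then order'
        else bLoop (q.drop (j + 1) ++ q.take j) location order' fuel

def solution_alt (priorities : List Int) (location : Int) : Int :=
  bLoop (PySem.List.enumerate priorities 0) location 0 (priorities.length + 1)

-- ===== PRECONDITION & SPEC =====
-- Pre_ admits exactly the inputs on which A terminates with a plain indexed read: a nonempty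
-- list of priorities in [-10, 9] whose values span at most 10 consecutive integers (so A's
-- prior_check buckets, reached via Python negative-index wraparound, never alias two distinct
-- priorities — outside that window A loops forever or raises IndexError), and a non-negative
-- valid location (for a negative location A returns check[location] by index wraparound while
-- B's queue simulation returns no int at all, i.e. None).
def Pre_solution (priorities : List Int) (location : Int) : Prop :=
  priorities ≠ [] ∧ (∀ p ∈ priorities, -10 ≤ p ∧ p ≤ 9) ∧
    (∀ p ∈ priorities, ∀ q ∈ priorities, p - q ≤ 9) ∧
    0 ≤ location ∧ location < priorities.length
instance (priorities : List Int) (location : Int) : Decidable (Pre_solution priorities location) := by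
  unfold Pre_solution; infer_instance

def pvWitness_solution : List Int × Int := ([2, 1, 3, 2], 1)

def Spec_solution (priorities : List Int) (location : Int) (out : Int) : Prop :=
  out = solution_alt priorities location
instance (priorities : List Int) (location : Int) (out : Int) : Decidable (Spec_solution priorities location out) := by
  unfold Spec_solution; infer_instance

-- ===== CLAIM (what is proved, stated in full; the proofs are below) =====
def Claim_equal_solution : Prop := ∀ (priorities : List Int) (location : Int),
  Dom_solution priorities location → Pre_solution priorities location →
    Spec_solution priorities location (solution priorities location)

-- ===== LEMMAS AND PROOFS =====

-- priorities of the positions in L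
def priList (pri : List Int) (L : List Nat) : List Int := L.map (fun p => pri.getD p 0)
-- B's queue for the remaining positions L
def pairList (pri : List Int) (L : List Nat) : List (Int × Int) :=
  L.map (fun (p : Nat) => ((p : Int), pri.getD p 0))
-- L lists positions in circular order starting at idx: first the ones ≥ idx, then the ones < idx
def circSorted (n idx : Nat) (L : List Nat) : Prop :=
  ∃ L1 L2, L = L1 ++ L2 ∧ L1.Pairwise (· < ·) ∧ L2.Pairwise (· < ·) ∧
    (∀ p ∈ L1, idx ≤ p ∧ p < n) ∧ (∀ p ∈ L2, p < idx)
-- circular distance from idx to p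
def cdist (n idx p : Nat) : Nat := (p + n - idx) % n

-- the prior_check slot Python's prior_check[w] hits: w for 0 ≤ w ≤ 9, w + 10 for -10 ≤ w < 0
def bidx (w : Int) : Nat := (w + 10).toNat % 10

lemma bidx_lt_ten (w : Int) : bidx w < 10 := by unfold bidx; omega

lemma bidx_ne {w v : Int} (h1 : -10 ≤ w) (h2 : w ≤ 9) (h3 : -10 ≤ v) (h4 : v ≤ 9)
    (h5 : 0 < v - w) (h6 : v - w ≤ 9) : bidx v ≠ bidx w := by
  unfold bidx; omega

lemma pyGetD_bucket (pc : List Int) (hlen : pc.length = 10) (w : Int)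
    (h1 : -10 ≤ w) (h2 : w ≤ 9) :
    PySem.List.pyGetD pc w 0 = pc.getD (bidx w) 0 := by
  by_cases h : 0 ≤ w
  · obtain ⟨m, rfl⟩ : ∃ m : Nat, w = (m : Int) := ⟨w.toNat, by omega⟩
    have hb : bidx (m : Int) = m := by unfold bidx; omega
    rw [PySem.List.pyGetD_natCast, hb]
  · obtain ⟨k, rfl⟩ : ∃ k : Nat, w = -(k : Int) := ⟨(-w).toNat, by omega⟩
    have hb : bidx (-(k : Int)) = pc.length - k := by unfold bidx; omega
    rw [PySem.List.pyGetD_neg_natCast pc k 0 (by omega) (by omega), hb,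
      List.getD_eq_getElem _ _ (by omega)]

lemma pyGet?_bucket (pc : List Int) (hlen : pc.length = 10) (w : Int)
    (h1 : -10 ≤ w) (h2 : w ≤ 9) :
    PySem.List.pyGet? pc w = some (pc.getD (bidx w) 0) := by
  by_cases h : 0 ≤ w
  · obtain ⟨m, rfl⟩ : ∃ m : Nat, w = (m : Int) := ⟨w.toNat, by omega⟩
    have hb : bidx (m : Int) = m := by unfold bidx; omega
    rw [PySem.List.pyGet?_natCast, hb, List.getElem?_eq_getElem (by omega),
      List.getD_eq_getElem _ _ (by omega)]
  · obtain ⟨k, rfl⟩ : ∃ k : Nat, w = -(k : Int) := ⟨(-w).toNat, by omega⟩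
    have hb : bidx (-(k : Int)) = pc.length - k := by unfold bidx; omega
    rw [PySem.List.pyGet?_neg_natCast pc k (by omega) (by omega), hb,
      List.getElem?_eq_getElem (by omega), List.getD_eq_getElem _ _ (by omega)]

lemma pySetD_bucket (pc : List Int) (hlen : pc.length = 10) (w v : Int)
    (h1 : -10 ≤ w) (h2 : w ≤ 9) :
    PySem.List.pySetD pc w v = pc.set (bidx w) v := by
  by_cases h : 0 ≤ w
  · obtain ⟨m, rfl⟩ : ∃ m : Nat, w = (m : Int) := ⟨w.toNat, by omega⟩
    have hb : bidx (m : Int) = m := by unfold bidx; omega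
    rw [PySem.List.pySetD_natCast, hb]
  · obtain ⟨k, rfl⟩ : ∃ k : Nat, w = -(k : Int) := ⟨(-w).toNat, by omega⟩
    have hb : bidx (-(k : Int)) = pc.length - k := by unfold bidx; omega
    -- negative index: unfold the primitive (exact Python wraparound index)
    simp only [PySem.List.pySetD, PySem.List.pySet?, PySem.List.pyIdx?]
    rw [if_neg (show ¬ (0 : Int) ≤ -(k : Int) by omega),
      if_pos (show -((pc.length : Nat) : Int) ≤ -(k : Int) by omega)]
    simp only [Option.map_some, Option.getD_some, hb]
    congr 1
    omega

lemma cd_ge (n idx p : Nat) (h : idx ≤ p) (hp : p < n) : cdist n idx p = p - idx := by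
  unfold cdist
  have h1 : p + n - idx = (p - idx) + n := by omega
  rw [h1, Nat.add_mod_right, Nat.mod_eq_of_lt (by omega)]

lemma cd_lt (n idx p : Nat) (h : p < idx) (hidx : idx < n) : cdist n idx p = p + n - idx := by
  unfold cdist
  exact Nat.mod_eq_of_lt (by omega)

lemma cd_recover (n idx p : Nat) (hidx : idx < n) (hp : p < n) :
    (idx + cdist n idx p) % n = p := by
  rcases Nat.lt_or_ge p idx with h | h
  · rw [cd_lt n idx p h hidx]
    have h2 : idx + (p + n - idx) = p + n := by omega
    rw [h2, Nat.add_mod_right, Nat.mod_eq_of_lt hp]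
  · rw [cd_ge n idx p h hp]
    have h2 : idx + (p - idx) = p := by omega
    rw [h2, Nat.mod_eq_of_lt hp]

lemma cd_inv (n idx k : Nat) (hidx : idx < n) (hk : k < n) :
    cdist n idx ((idx + k) % n) = k := by
  unfold cdist
  rcases Nat.lt_or_ge (idx + k) n with h | h
  · rw [Nat.mod_eq_of_lt h]
    have h2 : idx + k + n - idx = k + n := by omega
    rw [h2, Nat.add_mod_right, Nat.mod_eq_of_lt hk]
  · have h1 : (idx + k) % n = idx + k - n := by
      rw [Nat.mod_eq_sub_mod h, Nat.mod_eq_of_lt (by omega)]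
    rw [h1]
    have h2 : idx + k - n + n - idx = k := by omega
    rw [h2, Nat.mod_eq_of_lt hk]

lemma cs_mem_lt {n idx : Nat} {L : List Nat} (hidx : idx < n) (h : circSorted n idx L) :
    ∀ p ∈ L, p < n := by
  obtain ⟨L1, L2, rfl, _, _, h1, h2⟩ := h
  intro p hp
  rcases List.mem_append.mp hp with hp | hp
  · exact (h1 p hp).2
  · exact lt_trans (h2 p hp) hidx

lemma cs_cd_pairwise {n idx : Nat} {L : List Nat} (hidx : idx < n) (h : circSorted n idx L) :
    L.Pairwise (fun a b => cdist n idx a < cdist n idx b) := by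
  obtain ⟨L1, L2, rfl, hpw1, hpw2, h1, h2⟩ := h
  rw [List.pairwise_append]
  refine ⟨?_, ?_, ?_⟩
  · exact hpw1.imp_of_mem (fun {a b} ha hb hab => by
      rw [cd_ge n idx a (h1 a ha).1 (h1 a ha).2, cd_ge n idx b (h1 b hb).1 (h1 b hb).2]
      have := (h1 a ha).1; omega)
  · exact hpw2.imp_of_mem (fun {a b} ha hb hab => by
      rw [cd_lt n idx a (h2 a ha) hidx, cd_lt n idx b (h2 b hb) hidx]
      have := h2 a ha; omega)
  · intro a ha b hb
    rw [cd_ge n idx a (h1 a ha).1 (h1 a ha).2, cd_lt n idx b (h2 b hb) hidx]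
    have := (h1 a ha).1; have := (h1 a ha).2; have := h2 b hb; omega

lemma decompL {α : Type} (L : List α) (j : Nat) (hj : j < L.length) :
    L = L.take j ++ L[j] :: L.drop (j + 1) := by
  conv_lhs => rw [← List.take_append_drop j L]
  rw [List.getElem_cons_drop hj]

lemma cs_rotate {n idx : Nat} {L : List Nat} (hidx : idx < n) (h : circSorted n idx L)
    (j : Nat) (hj : j < L.length) :
    circSorted n ((L[j] + 1) % n) (L.drop (j + 1) ++ L.take j) := by
  obtain ⟨L1, L2, rfl, hpw1, hpw2, h1, h2⟩ := h
  rcases Nat.lt_or_ge j L1.length with hj1 | hj1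
  · -- the printed position is in L1 (≥ idx)
    have ht : (L1 ++ L2)[j] = L1[j] := List.getElem_append_left hj1
    have htake : List.take j (L1 ++ L2) = L1.take j := List.take_append_of_le_length (le_of_lt hj1)
    have hdrop : List.drop (j + 1) (L1 ++ L2) = L1.drop (j + 1) ++ L2 :=
      List.drop_append_of_le_length hj1
    have hpw1' := hpw1
    rw [decompL L1 j hj1] at hpw1'
    rw [List.pairwise_append] at hpw1'
    obtain ⟨hpwt, hpwc, hcross⟩ := hpw1'
    rw [List.pairwise_cons] at hpwc
    have htlt : ∀ x ∈ L1.take j, x < L1[j] := fun x hx => hcross x hx _ List.mem_cons_self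
    have htgt : ∀ x ∈ L1.drop (j + 1), L1[j] < x := hpwc.1
    have hmem1 : ∀ x ∈ L1.take j, x ∈ L1 := fun x hx => (List.take_sublist _ _).mem hx
    have hmemd : ∀ x ∈ L1.drop (j + 1), x ∈ L1 := fun x hx => (List.drop_sublist _ _).mem hx
    have hjb := h1 L1[j] (List.getElem_mem hj1)
    rcases Nat.lt_or_ge (L1[j] + 1) n with hlt | hge
    · refine ⟨L1.drop (j + 1), L2 ++ L1.take j, ?_, ?_, ?_, ?_, ?_⟩
      · rw [htake, hdrop, List.append_assoc]
      · exact hpwc.2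
      · rw [List.pairwise_append]
        exact ⟨hpw2, hpwt, by
          intro a ha b hb
          have := h2 a ha; have := (h1 b (hmem1 b hb)).1; omega⟩
      · intro p hp
        rw [ht, Nat.mod_eq_of_lt hlt]
        have := htgt p hp; have := (h1 p (hmemd p hp)).2
        omega
      · intro p hp
        rw [ht, Nat.mod_eq_of_lt hlt]
        rcases List.mem_append.mp hp with hp | hp
        · have := h2 p hp; omega
        · have := htlt p hp; omega
    · -- L1[j] = n - 1 : wrap to 0
      have hjn : L1[j] + 1 = n := by omega
      have hdnil : L1.drop (j + 1) = [] := by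
        rw [List.eq_nil_iff_forall_not_mem]
        intro x hx
        have := htgt x hx; have := (h1 x (hmemd x hx)).2; omega
      refine ⟨L2 ++ L1.take j, [], ?_, ?_, ?_, ?_, ?_⟩
      · rw [htake, hdrop, hdnil, List.nil_append, List.append_nil]
      · rw [List.pairwise_append]
        exact ⟨hpw2, hpwt, by
          intro a ha b hb
          have := h2 a ha; have := (h1 b (hmem1 b hb)).1; omega⟩
      · exact List.Pairwise.nil
      · intro p hp
        rw [ht, hjn, Nat.mod_self]
        rcases List.mem_append.mp hp with hp | hp
        · exact ⟨Nat.zero_le _, lt_trans (h2 p hp) hidx⟩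
        · exact ⟨Nat.zero_le _, (h1 p (hmem1 p hp)).2⟩
      · intro p hp; cases hp
  · -- the printed position is in L2 (< idx)
    obtain ⟨j2, rfl⟩ : ∃ j2, j = L1.length + j2 := ⟨j - L1.length, by omega⟩
    have hj2 : j2 < L2.length := by
      rw [List.length_append] at hj; omega
    have ht : (L1 ++ L2)[L1.length + j2] = L2[j2] := by
      rw [List.getElem_append_right (by omega)]
      congr 1; omega
    have htake : List.take (L1.length + j2) (L1 ++ L2) = L1 ++ L2.take j2 := by
      rw [List.take_append, List.take_of_length_le (by omega)]
      congr 2; omega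
    have hdrop : List.drop (L1.length + j2 + 1) (L1 ++ L2) = L2.drop (j2 + 1) := by
      rw [List.drop_append, List.drop_eq_nil_of_le (by omega), List.nil_append]
      congr 1; omega
    have hpw2' := hpw2
    rw [decompL L2 j2 hj2] at hpw2'
    rw [List.pairwise_append] at hpw2'
    obtain ⟨hpwt, hpwc, hcross⟩ := hpw2'
    rw [List.pairwise_cons] at hpwc
    have htlt : ∀ x ∈ L2.take j2, x < L2[j2] := fun x hx => hcross x hx _ List.mem_cons_self
    have htgt : ∀ x ∈ L2.drop (j2 + 1), L2[j2] < x := hpwc.1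
    have hmem1 : ∀ x ∈ L2.take j2, x ∈ L2 := fun x hx => (List.take_sublist _ _).mem hx
    have hmemd : ∀ x ∈ L2.drop (j2 + 1), x ∈ L2 := fun x hx => (List.drop_sublist _ _).mem hx
    have hjb := h2 L2[j2] (List.getElem_mem hj2)
    have hlt : L2[j2] + 1 < n := by omega
    refine ⟨L2.drop (j2 + 1) ++ L1, L2.take j2, ?_, ?_, ?_, ?_, ?_⟩
    · rw [htake, hdrop, List.append_assoc]
    · rw [List.pairwise_append]
      exact ⟨hpwc.2, hpw1, by
        intro a ha b hb
        have := h2 a (hmemd a ha); have := (h1 b hb).1; omega⟩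
    · exact hpwt
    · intro p hp
      rw [ht, Nat.mod_eq_of_lt hlt]
      rcases List.mem_append.mp hp with hp | hp
      · have := htgt p hp; have := h2 p (hmemd p hp); omega
      · have := (h1 p hp).1; have := (h1 p hp).2; omega
    · intro p hp
      rw [ht, Nat.mod_eq_of_lt hlt]
      have := htlt p hp; omega

lemma getD_set_ne {check : List Int} {i p : Nat} (v : Int) (h : i ≠ p) :
    (check.set i v).getD p 0 = check.getD p 0 := by
  rw [List.getD_eq_getElem?_getD, List.getD_eq_getElem?_getD, List.getElem?_set, if_neg h]

lemma getD_set_self {check : List Int} {i : Nat} (v : Int) (h : i < check.length) :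
    (check.set i v).getD i 0 = v := by
  rw [List.getD_eq_getElem?_getD, List.getElem?_set, if_pos rfl, if_pos h]
  rfl

lemma solLoop_skip (pri : List Int) (n : Nat) (check pc : List Int) (cnt nm : Int)
    (hcnt : cnt ≠ (n : Int)) :
    ∀ (d fuel idx : Nat), 0 < n → idx < n →
    (∀ k, k < d → check.getD ((idx + k) % n) 0 ≠ 0 ∨ pri.getD ((idx + k) % n) 0 ≠ nm) →
    solLoop pri ↑n check pc cnt ↑idx nm (d + fuel)
      = solLoop pri ↑n check pc cnt ↑((idx + d) % n) nm fuel := by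
  intro d
  induction d with
  | zero =>
    intro fuel idx hn hidx _
    rw [Nat.add_zero, Nat.mod_eq_of_lt hidx, Nat.zero_add]
  | succ d ih =>
    intro fuel idx hn hidx hskip
    have hstep : (d + 1) + fuel = (d + fuel) + 1 := by omega
    rw [hstep]
    have h0 := hskip 0 (by omega)
    rw [Nat.add_zero, Nat.mod_eq_of_lt hidx] at h0
    have hmod : PySem.Int.mod ((idx : Int) + 1) ↑n = ↑((idx + 1) % n) := by
      rw [show ((idx : Int) + 1) = ((idx + 1 : Nat) : Int) by push_cast; ring, PySem.Int.mod_natCast]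
    have hnext : ∀ k, k < d →
        check.getD (((idx + 1) % n + k) % n) 0 ≠ 0 ∨ pri.getD (((idx + 1) % n + k) % n) 0 ≠ nm := by
      intro k hk
      have : ((idx + 1) % n + k) % n = (idx + (k + 1)) % n := by
        rw [Nat.mod_add_mod]; congr 1; omega
      rw [this]
      exact hskip (k + 1) (by omega)
    have hres : ((idx + 1) % n + d) % n = (idx + (d + 1)) % n := by
      rw [Nat.mod_add_mod]; congr 1; omega
    rcases h0 with h0 | h0
    · show solLoop pri ↑n check pc cnt ↑idx nm ((d + fuel) + 1) = _
      simp only [solLoop, if_neg hcnt, PySem.List.pyGetD_natCast, if_neg h0]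
      rw [hmod, ih fuel ((idx + 1) % n) hn (Nat.mod_lt _ hn) hnext, hres]
    · by_cases hc : check.getD idx 0 = 0
      · show solLoop pri ↑n check pc cnt ↑idx nm ((d + fuel) + 1) = _
        simp only [solLoop, if_neg hcnt, PySem.List.pyGetD_natCast, if_pos hc, if_neg h0]
        rw [hmod, ih fuel ((idx + 1) % n) hn (Nat.mod_lt _ hn) hnext, hres]
      · show solLoop pri ↑n check pc cnt ↑idx nm ((d + fuel) + 1) = _
        simp only [solLoop, if_neg hcnt, PySem.List.pyGetD_natCast, if_neg hc]
        rw [hmod, ih fuel ((idx + 1) % n) hn (Nat.mod_lt _ hn) hnext, hres]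

lemma solLoop_preserve (pri : List Int) (n : Nat) (hn : 0 < n) (p : Nat) :
    ∀ (fuel : Nat) (check pc : List Int) (cnt nm : Int) (idx : Nat), idx < n →
    check.getD p 0 ≠ 0 →
    (solLoop pri ↑n check pc cnt ↑idx nm fuel).getD p 0 = check.getD p 0 := by
  intro fuel
  induction fuel with
  | zero => intro check pc cnt nm idx _ _; rfl
  | succ fuel ih =>
    intro check pc cnt nm idx hidx hp
    have hmod : PySem.Int.mod ((idx : Int) + 1) ↑n = ↑((idx + 1) % n) := by
      rw [show ((idx : Int) + 1) = ((idx + 1 : Nat) : Int) by push_cast; ring, PySem.Int.mod_natCast]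
    by_cases h1 : cnt = (n : Int)
    · simp only [solLoop, if_pos h1]
    by_cases h2 : check.getD idx 0 = 0
    · by_cases h3 : pri.getD idx 0 = nm
      · have hne : idx ≠ p := fun he => hp (he ▸ h2)
        have hkeep : (check.set idx (cnt + 1)).getD p 0 = check.getD p 0 := getD_set_ne _ hne
        by_cases h4 : cnt + 1 = (n : Int)
        · simp only [solLoop, if_neg h1, PySem.List.pyGetD_natCast, if_pos h2, if_pos h3,
            PySem.List.pySetD_natCast, if_pos h4]
          exact hkeep
        · simp only [solLoop, if_neg h1, PySem.List.pyGetD_natCast, if_pos h2, if_pos h3,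
            PySem.List.pySetD_natCast, if_neg h4]
          rw [hmod, ih _ _ _ _ _ (Nat.mod_lt _ hn) (by rw [hkeep]; exact hp), hkeep]
      · simp only [solLoop, if_neg h1, PySem.List.pyGetD_natCast, if_pos h2, if_neg h3]
        rw [hmod, ih _ _ _ _ _ (Nat.mod_lt _ hn) hp]
    · simp only [solLoop, if_neg h1, PySem.List.pyGetD_natCast, if_neg h2]
      rw [hmod, ih _ _ _ _ _ (Nat.mod_lt _ hn) hp]

lemma solInner_eq (pc : List Int) (hlen : pc.length = 10) (t : Int) (ht1 : -10 ≤ t) (ht2 : t ≤ 9)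
    (h0 : pc.getD (bidx t) 0 ≠ 0) :
    ∀ (fuel : Nat) (nm : Int), nm ≤ 9 → t ≤ nm →
    (∀ v : Int, t < v → v ≤ nm → pc.getD (bidx v) 0 = 0) →
    (nm - t).toNat < fuel → solInner pc nm fuel = t := by
  intro fuel
  induction fuel with
  | zero => intro nm _ _ _ hf; omega
  | succ fuel ih =>
    intro nm hnm9 htnm hz hf
    have hget : PySem.List.pyGet? pc nm = some (pc.getD (bidx nm) 0) :=
      pyGet?_bucket pc hlen nm (by omega) hnm9
    by_cases he : nm = t
    · subst he
      simp only [solInner, hget]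
      rw [if_pos h0]
    · have hzr : pc.getD (bidx nm) 0 = 0 := hz nm (by omega) (le_refl _)
      simp only [solInner, hget, hzr]
      rw [if_neg (by simp)]
      exact ih (nm - 1) (by omega) (by omega) (fun v h1 h2 => hz v h1 (by omega)) (by omega)
lemma pc_fold (xs : List Int) : ∀ (pc : List Int), pc.length = 10 →
    (∀ p ∈ xs, -10 ≤ p ∧ p ≤ 9) →
    (xs.foldl (fun pc p => PySem.List.pySetD pc p (PySem.List.pyGetD pc p 0 + 1)) pc).length = 10 ∧
    ∀ v : Nat, (xs.foldl (fun pc p => PySem.List.pySetD pc p (PySem.List.pyGetD pc p 0 + 1)) pc).getD v 0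
      = pc.getD v 0 + (xs.countP (fun w => bidx w == v) : Int) := by
  induction xs with
  | nil => intro pc hlen _; simpa using hlen
  | cons x xs ih =>
    intro pc hlen hb
    have hx := hb x List.mem_cons_self
    rw [List.foldl_cons]
    have hpc' : (PySem.List.pySetD pc x (PySem.List.pyGetD pc x 0 + 1))
        = pc.set (bidx x) (pc.getD (bidx x) 0 + 1) := by
      rw [pyGetD_bucket pc hlen x hx.1 hx.2, pySetD_bucket pc hlen x _ hx.1 hx.2]
    rw [hpc']
    obtain ⟨hl', hv'⟩ := ih (pc.set (bidx x) (pc.getD (bidx x) 0 + 1))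
      (by rw [List.length_set]; exact hlen) (fun p hp => hb p (List.mem_cons_of_mem _ hp))
    refine ⟨hl', fun v => ?_⟩
    rw [hv' v, List.countP_cons]
    by_cases hvx : bidx x = v
    · subst hvx
      rw [getD_set_self _ (by rw [hlen]; exact bidx_lt_ten x), if_pos (by simp)]
      push_cast; ring
    · rw [getD_set_ne _ hvx, if_neg (by simp only [beq_iff_eq]; omega)]
      push_cast; ring
lemma map_getD_range (xs : List Int) :
    (List.range xs.length).map (fun p => xs.getD p 0) = xs := by
  apply List.ext_getElem
  · simp
  · intro i h1 h2
    simp only [List.getElem_map, List.getElem_range]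
    exact List.getD_eq_getElem _ _ h2

lemma enumerate_eq (xs : List Int) : ∀ (s : Int),
    PySem.List.enumerate xs s = (List.range xs.length).map (fun (k : Nat) => (s + (k : Int), xs.getD k 0)) := by
  induction xs with
  | nil => intro s; simp [PySem.List.enumerate_nil]
  | cons x xs ih =>
    intro s
    rw [PySem.List.enumerate_cons, ih (s + 1), List.length_cons, List.range_succ_eq_map,
      List.map_cons, List.map_map]
    congr 1
    · simp
    · apply List.map_congr_left
      intro k _
      simp only [Function.comp_apply, Nat.succ_eq_add_one, List.getD_cons_succ]
      congr 1
      push_cast; ring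

lemma max?_unique {xs : List Int} {m0 m : Int}
    (h : PySem.List.max? xs (fun y => y) = some m0) (hm : m ∈ xs) (hmax : ∀ y ∈ xs, y ≤ m) :
    m0 = m := by
  exact le_antisymm (hmax m0 (PySem.List.max?_mem h)) (PySem.List.max?_isMax h m hm)

lemma cast_mod_succ (idx n : Nat) :
    PySem.Int.mod ((idx : Int) + 1) ↑n = ↑((idx + 1) % n) := by
  rw [show ((idx : Int) + 1) = ((idx + 1 : Nat) : Int) by push_cast; ring, PySem.Int.mod_natCast]

lemma pairList_snd (pri : List Int) (L : List Nat) :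
    (pairList pri L).map Prod.snd = priList pri L := by
  simp [pairList, priList, List.map_map, Function.comp_def]

lemma sim (pri : List Int) (n : Nat) (hn : 0 < n) (hplen : pri.length = n)
    (hpr : ∀ p ∈ pri, -10 ≤ p ∧ p ≤ 9)
    (hwin : ∀ p ∈ pri, ∀ q ∈ pri, p - q ≤ 9) (loc : Nat) :
    ∀ (len : Nat) (L : List Nat) (check pc : List Int) (nm : Int) (idx fuelA fuelB : Nat),
      L.length = len →
      check.length = n → pc.length = 10 → idx < n → L.length ≤ n →
      circSorted n idx L →
      (∀ p, p < n → (check.getD p 0 = 0 ↔ p ∈ L)) →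
      (∀ v : Nat, pc.getD v 0 = ((priList pri L).countP (fun w => bidx w == v) : Int)) →
      nm ∈ priList pri L →
      (∀ y ∈ priList pri L, y ≤ nm) →
      loc ∈ L →
      n * L.length < fuelA → L.length ≤ fuelB →
      (solLoop pri ↑n check pc ((n : Int) - L.length) ↑idx nm fuelA).getD loc 0
        = bLoop (pairList pri L) ↑loc ((n : Int) - L.length) fuelB := by
  intro len
  induction len using Nat.strong_induction_on with
  | _ len IH =>
    intro L check pc nm idx fuelA fuelB hLlen hchk hpc hidx hLn hcs hI2 hcount hmem hmax hloc hfA hfB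
    have hLne : L ≠ [] := fun h => by simp [h] at hloc
    have hlen1 : 1 ≤ L.length := List.length_pos_of_ne_nil hLne
    have hplpri : ∀ y ∈ priList pri L, y ∈ pri := by
      intro y hy
      obtain ⟨p, hp, rfl⟩ := List.mem_map.mp hy
      have hpn := cs_mem_lt hidx hcs p hp
      rw [List.getD_eq_getElem _ _ (by omega)]
      exact List.getElem_mem _
    -- the position t printed this round, at queue index j, circular distance d from idx
    have hex : ∃ p ∈ L, (pri.getD p 0 == nm) = true := by
      obtain ⟨p, hp, he⟩ := List.mem_map.mp hmem
      exact ⟨p, hp, beq_iff_eq.mpr he⟩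
    have hjlt : L.findIdx (fun p => pri.getD p 0 == nm) < L.length :=
      List.findIdx_lt_length.mpr hex
    set j := L.findIdx (fun p => pri.getD p 0 == nm) with hjdef
    set t := L[j]'hjlt with htdef
    have ht_pri : pri.getD t 0 = nm := beq_iff_eq.mp (List.findIdx_getElem (w := hjlt))
    have ht_mem : t ∈ L := List.getElem_mem hjlt
    have ht_n : t < n := cs_mem_lt hidx hcs t ht_mem
    have ht_chk : check.getD t 0 = 0 := (hI2 t ht_n).mpr ht_mem
    have hcdpw := cs_cd_pairwise hidx hcs
    have hpwg := List.pairwise_iff_getElem.mp hcdpw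
    set d := cdist n idx t with hddef
    have hd_n : d < n := Nat.mod_lt _ hn
    have hrec : (idx + d) % n = t := cd_recover n idx t hidx ht_n
    have hskip : ∀ k, k < d →
        check.getD ((idx + k) % n) 0 ≠ 0 ∨ pri.getD ((idx + k) % n) 0 ≠ nm := by
      intro k hk
      by_cases hc : check.getD ((idx + k) % n) 0 = 0
      · right
        have hpn : (idx + k) % n < n := Nat.mod_lt _ hn
        have hpL : (idx + k) % n ∈ L := (hI2 _ hpn).mp hc
        obtain ⟨i, hi, hieq⟩ := List.mem_iff_getElem.mp hpL
        have hcd : cdist n idx ((idx + k) % n) = k := cd_inv n idx k hidx (by omega)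
        have hij : i < j := by
          rcases lt_trichotomy i j with h | h | h
          · exact h
          · exfalso
            have h3 : L[i]'hi = t := by simp only [htdef, h]
            rw [h3] at hieq
            rw [← hieq] at hcd
            omega
          · exfalso
            have h4 := hpwg j i hjlt hi h
            rw [hieq, hcd, ← htdef, ← hddef] at h4
            omega
        have hfalse := List.not_of_lt_findIdx (p := fun p => pri.getD p 0 == nm) (hjdef ▸ hij)
        have hfalse2 : (pri.getD ((idx + k) % n) 0 == nm) = false := by
          rw [← hieq]; exact hfalse
        simpa using hfalse2
      · left; exact hc
    have hcne : ((n : Int) - L.length) ≠ (n : Int) := by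
      have := hlen1; omega
    have hmul : n * L.length = n * (L.length - 1) + n := by
      conv_lhs => rw [show L.length = (L.length - 1) + 1 by omega]
      rw [Nat.mul_succ]
    have hdfa : d ≤ fuelA := by omega
    have hfa2 : fuelA = d + (fuelA - d) := by omega
    rw [hfa2, solLoop_skip pri n check pc _ nm hcne d (fuelA - d) idx hn hidx hskip, hrec]
    have hfu2 : fuelA - d = (fuelA - d - 1) + 1 := by omega
    have hfb2 : fuelB = (fuelB - 1) + 1 := by omega
    rw [hfu2, hfb2]
    -- unfold one step of each loop
    have hqne : pairList pri L ≠ [] := by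
      simp [pairList]; exact hLne
    have hqlen : (pairList pri L).length = L.length := List.length_map ..
    have hjq : (pairList pri L).findIdx (fun e => e.2 == nm) = j := by
      rw [pairList, List.findIdx_map]; rfl
    have hmx : PySem.List.max? ((pairList pri L).map Prod.snd) (fun y => y) = some nm := by
      rw [pairList_snd]
      cases hmx0 : PySem.List.max? (priList pri L) (fun y => y) with
      | none =>
        rw [PySem.List.max?_eq_none_iff] at hmx0
        rw [hmx0] at hmem
        cases hmem
      | some m0 => rw [max?_unique hmx0 hmem hmax]
    have hqget : (pairList pri L).getD j (0, 0) = ((t : Int), pri.getD t 0) := by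
      rw [List.getD_eq_getElem _ _ (by rw [hqlen]; exact hjlt)]
      simp only [pairList, List.getElem_map]
      rw [← htdef]
    have hqemp : (pairList pri L).isEmpty = false := by
      rw [List.isEmpty_eq_false_iff]; exact hqne
    have hA1 : solLoop pri ↑n check pc ((n : Int) - L.length) ↑t nm ((fuelA - d - 1) + 1)
        = if ((n : Int) - L.length + 1) = ↑n then check.set t ((n : Int) - L.length + 1)
          else solLoop pri ↑n (check.set t ((n : Int) - L.length + 1))
                 (PySem.List.pySetD pc nm (PySem.List.pyGetD pc nm 0 - 1))
                 ((n : Int) - L.length + 1) (PySem.Int.mod ((t : Int) + 1) ↑n)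
                 (solInner (PySem.List.pySetD pc nm (PySem.List.pyGetD pc nm 0 - 1)) nm 30)
                 (fuelA - d - 1) := by
      simp only [solLoop, if_neg hcne, PySem.List.pyGetD_natCast, ht_chk, ht_pri,
        PySem.List.pySetD_natCast]
      simp
    have hB1 : bLoop (pairList pri L) ↑loc ((n : Int) - L.length) ((fuelB - 1) + 1)
        = if ((t : Int) = ↑loc) then ((n : Int) - L.length + 1)
          else bLoop ((pairList pri L).drop (j + 1) ++ (pairList pri L).take j) ↑loc
                 ((n : Int) - L.length + 1) (fuelB - 1) := by
      simp only [bLoop, hqemp, Bool.false_eq_true, if_false, hmx, hjq, hqget]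
    rw [hA1, hB1]
    by_cases hloct : loc = t
    · -- the target prints this round: B returns, A's cell keeps its value to the end
      have htleq : ((t : Int) = ↑loc) := by rw [hloct]
      by_cases hfin : ((n : Int) - L.length + 1) = ↑n
      · rw [if_pos hfin, if_pos htleq, hloct, getD_set_self _ (by rw [hchk]; exact ht_n)]
      · rw [if_neg hfin, if_pos htleq, cast_mod_succ t n]
        rw [solLoop_preserve pri n hn loc _ _ _ _ _ ((t + 1) % n) (Nat.mod_lt _ hn)
          (by rw [hloct, getD_set_self _ (by rw [hchk]; exact ht_n)]; have := hLn; omega)]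
        rw [hloct, getD_set_self _ (by rw [hchk]; exact ht_n)]
    · have htl : ¬ ((t : Int) = ↑loc) := fun he => hloct (by exact_mod_cast he.symm)
      rw [if_neg htl]
      by_cases hfin : ((n : Int) - L.length + 1) = ↑n
      · exfalso
        have hlen1' : L.length = 1 := by omega
        obtain ⟨a, ha⟩ := List.length_eq_one_iff.mp hlen1'
        have hj0 : j = 0 := by omega
        have hta : t = a := by rw [htdef]; simp only [hj0, ha]; rfl
        rw [ha] at hloc
        exact hloct (by simpa [hta] using hloc)
      · rw [if_neg hfin, cast_mod_succ t n]
        -- the remaining queue after this round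
        have hq' : (pairList pri L).drop (j + 1) ++ (pairList pri L).take j
            = pairList pri (L.drop (j + 1) ++ L.take j) := by
          simp [pairList, List.map_drop, List.map_take]
        have hdec : L = L.take j ++ t :: L.drop (j + 1) := by
          rw [htdef]; exact decompL L j hjlt
        have hpwd := hcdpw
        rw [hdec, List.pairwise_append, List.pairwise_cons] at hpwd
        have htnd : t ∉ L.drop (j + 1) := fun hx => absurd (hpwd.2.1.1 t hx) (lt_irrefl _)
        have htnt : t ∉ L.take j := fun hx =>
          absurd (hpwd.2.2 t hx t List.mem_cons_self) (lt_irrefl _)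
        have hmemL' : ∀ p : Nat, (p ∈ L.drop (j + 1) ++ L.take j) ↔ (p ∈ L ∧ p ≠ t) := by
          intro p
          constructor
          · intro hp
            rcases List.mem_append.mp hp with hp | hp
            · exact ⟨(List.drop_sublist _ _).mem hp, fun he => htnd (he ▸ hp)⟩
            · exact ⟨(List.take_sublist _ _).mem hp, fun he => htnt (he ▸ hp)⟩
          · rintro ⟨hpL, hpt⟩
            rw [hdec] at hpL
            rcases List.mem_append.mp hpL with hp | hp
            · exact List.mem_append.mpr (Or.inr hp)
            · rcases List.mem_cons.mp hp with hp | hp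
              · exact absurd hp hpt
              · exact List.mem_append.mpr (Or.inl hp)
        have hL'len : (L.drop (j + 1) ++ L.take j).length = L.length - 1 := by
          rw [List.length_append, List.length_drop, List.length_take]; omega
        have hlocL' : loc ∈ L.drop (j + 1) ++ L.take j := (hmemL' loc).mpr ⟨hloc, hloct⟩
        have hI2' : ∀ p, p < n →
            ((check.set t ((n : Int) - L.length + 1)).getD p 0 = 0 ↔ p ∈ L.drop (j + 1) ++ L.take j) := by
          intro p hp
          by_cases hpt : p = t
          · subst hpt
            rw [getD_set_self _ (by rw [hchk]; exact ht_n)]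
            constructor
            · intro h; exfalso; have := hLn; omega
            · intro h; exact absurd rfl ((hmemL' t).mp h).2
          · rw [getD_set_ne _ (fun he => hpt he.symm), hI2 p hp, hmemL' p]
            exact ⟨fun h => ⟨h, hpt⟩, fun h => h.1⟩
        have hplL : priList pri L = priList pri (L.take j) ++ nm :: priList pri (L.drop (j + 1)) := by
          conv_lhs => rw [hdec]
          simp only [priList, List.map_append, List.map_cons]
          rw [ht_pri]
        have hplL' : priList pri (L.drop (j + 1) ++ L.take j)
            = priList pri (L.drop (j + 1)) ++ priList pri (L.take j) := by
          simp [priList]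
        have hnmb : -10 ≤ nm ∧ nm ≤ 9 := hpr nm (hplpri nm hmem)
        have hpc'eq : PySem.List.pySetD pc nm (PySem.List.pyGetD pc nm 0 - 1)
            = pc.set (bidx nm) (pc.getD (bidx nm) 0 - 1) := by
          rw [pyGetD_bucket pc hpc nm hnmb.1 hnmb.2, pySetD_bucket pc hpc nm _ hnmb.1 hnmb.2]
        have hcount' : ∀ v : Nat, (pc.set (bidx nm) (pc.getD (bidx nm) 0 - 1)).getD v 0
            = ((priList pri (L.drop (j + 1) ++ L.take j)).countP (fun w => bidx w == v) : Int) := by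
          intro v
          by_cases hv : v = bidx nm
          · subst hv
            rw [getD_set_self _ (by rw [hpc]; exact bidx_lt_ten nm), hcount, hplL, hplL']
            rw [List.countP_append, List.countP_append, List.countP_cons, if_pos (by simp)]
            push_cast; ring
          · rw [getD_set_ne _ (fun he => hv he.symm), hcount, hplL, hplL']
            rw [List.countP_append, List.countP_append, List.countP_cons,
              if_neg (by simp only [beq_iff_eq]; omega)]
            push_cast; ring
        have hplne : priList pri (L.drop (j + 1) ++ L.take j) ≠ [] := by
          intro h
          have h2 : (L.drop (j + 1) ++ L.take j) = [] := by simpa [priList] using h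
          rw [h2] at hlocL'
          cases hlocL'
        cases hmx1 : PySem.List.max? (priList pri (L.drop (j + 1) ++ L.take j)) (fun y => y) with
        | none => exact absurd (PySem.List.max?_eq_none_iff _ _ |>.mp hmx1) hplne
        | some m1 =>
          have hm1mem := PySem.List.max?_mem hmx1
          have hm1max := PySem.List.max?_isMax hmx1
          have hsubset : ∀ y ∈ priList pri (L.drop (j + 1) ++ L.take j), y ∈ priList pri L := by
            intro y hy
            obtain ⟨p, hp, rfl⟩ := List.mem_map.mp hy
            exact List.mem_map.mpr ⟨p, ((hmemL' p).mp hp).1, rfl⟩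
          have hm1b : -10 ≤ m1 ∧ m1 ≤ 9 := hpr m1 (hplpri m1 (hsubset m1 hm1mem))
          have hm1nm : m1 ≤ nm := hmax m1 (hsubset m1 hm1mem)
          have hinner : solInner (pc.set (bidx nm) (pc.getD (bidx nm) 0 - 1)) nm 30 = m1 := by
            have h0 : (pc.set (bidx nm) (pc.getD (bidx nm) 0 - 1)).getD (bidx m1) 0 ≠ 0 := by
              rw [hcount' (bidx m1)]
              have hpos : 0 < (priList pri (L.drop (j + 1) ++ L.take j)).countP
                  (fun w => bidx w == bidx m1) :=
                List.countP_pos_iff.mpr ⟨m1, hm1mem, by simp⟩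
              intro h
              rw [Int.natCast_eq_zero] at h
              omega
            have hz : ∀ v : Int, m1 < v → v ≤ nm →
                (pc.set (bidx nm) (pc.getD (bidx nm) 0 - 1)).getD (bidx v) 0 = 0 := by
              intro v hv1 hv2
              rw [hcount' (bidx v)]
              have hzero : (priList pri (L.drop (j + 1) ++ L.take j)).countP
                  (fun w => bidx w == bidx v) = 0 := by
                rw [List.countP_eq_zero]
                intro w hw
                have hwb := hpr w (hplpri w (hsubset w hw))
                have hwm1 := hm1max w hw
                have hwnm : nm - w ≤ 9 := hwin nm (hplpri nm hmem) w (hplpri w (hsubset w hw))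
                simp only [beq_iff_eq]
                exact Ne.symm (bidx_ne hwb.1 hwb.2 (by omega) (by omega) (by omega) (by omega))
              rw [hzero]
              rfl
            exact solInner_eq _ (by rw [List.length_set]; exact hpc) m1 hm1b.1 hm1b.2 h0 30 nm
              hnmb.2 hm1nm hz (by omega)
          have hcs' : circSorted n ((t + 1) % n) (L.drop (j + 1) ++ L.take j) := by
            have := cs_rotate hidx hcs j hjlt
            rwa [← htdef] at this
          have hres := IH (L.length - 1) (by omega) (L.drop (j + 1) ++ L.take j)
            (check.set t ((n : Int) - L.length + 1)) (pc.set (bidx nm) (pc.getD (bidx nm) 0 - 1)) m1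
            ((t + 1) % n) (fuelA - d - 1) (fuelB - 1)
            hL'len
            (by rw [List.length_set]; exact hchk) (by rw [List.length_set]; exact hpc)
            (Nat.mod_lt _ hn) (by rw [hL'len]; omega) hcs' hI2' hcount'
            hm1mem hm1max hlocL' (by rw [hL'len]; omega) (by rw [hL'len]; omega)
          have hcnt2 : ((n : Int) - ((L.drop (j + 1) ++ L.take j).length : Int))
              = (n : Int) - L.length + 1 := by
            rw [hL'len]; have := hlen1; push_cast [Nat.cast_sub hlen1]; ring
          rw [hcnt2] at hres
          rw [hq', hpc'eq, hinner]
          exact hres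



-- ===== VERDICT (by name: the statement is the Claim_ definition above) =====
theorem solution_spec : Claim_equal_solution := by
  unfold Claim_equal_solution Spec_solution Pre_solution
  intro pri loc _hdom hpre
  obtain ⟨hne, hbound, hwin, hloc0, hlocn⟩ := hpre
  have hn : 0 < pri.length := List.length_pos_of_ne_nil hne
  cases hmx0 : PySem.List.max? pri (fun x => x) with
  | none => exact absurd ((PySem.List.max?_eq_none_iff _ _).mp hmx0) hne
  | some m =>
    have hmmem : m ∈ pri := PySem.List.max?_mem hmx0
    have hmmax : ∀ y ∈ pri, y ≤ m := PySem.List.max?_isMax hmx0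
    obtain ⟨hpclen, hpcval⟩ := pc_fold pri (List.replicate 10 0) (by simp) hbound
    have hrep0 : ∀ (k : Nat) (v : Nat), (List.replicate k (0 : Int)).getD v 0 = 0 := by
      intro k v
      rw [List.getD_eq_getElem?_getD, List.getElem?_replicate]
      split <;> rfl
    have hloceq : loc = ((loc.toNat : Nat) : Int) := by omega
    have hlocn' : loc.toNat < pri.length := by omega
    have hpl : priList pri (List.range pri.length) = pri := map_getD_range pri
    have hqinit : PySem.List.enumerate pri 0 = pairList pri (List.range pri.length) := by
      rw [enumerate_eq pri 0]
      simp [pairList]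
    have hsim := sim pri pri.length hn rfl hbound hwin loc.toNat pri.length
      (List.range pri.length) (List.replicate pri.length 0)
      (pri.foldl (fun pc p => PySem.List.pySetD pc p (PySem.List.pyGetD pc p 0 + 1))
        (List.replicate 10 0))
      m 0 ((pri.length + 1) * (pri.length + 1)) (pri.length + 1)
      (List.length_range ..) (List.length_replicate ..) hpclen hn
      (by rw [List.length_range])
      ⟨List.range pri.length, [], (List.append_nil _).symm, List.pairwise_lt_range,
        List.Pairwise.nil, fun p hp => ⟨Nat.zero_le _, List.mem_range.mp hp⟩,
        fun p hp => absurd hp List.not_mem_nil⟩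
      (fun p hp => ⟨fun _ => List.mem_range.mpr hp, fun _ => hrep0 _ _⟩)
      (fun v => by rw [hpcval v, hrep0 10 v, hpl]; ring)
      (by rw [hpl]; exact hmmem) (by rw [hpl]; exact hmmax)
      (List.mem_range.mpr hlocn')
      (by
        rw [List.length_range]
        calc pri.length * pri.length < pri.length * pri.length + 2 * pri.length + 1 := by omega
          _ = (pri.length + 1) * (pri.length + 1) := by ring)
      (by rw [List.length_range]; omega)
    have hc0 : ((pri.length : Int) - ((List.range pri.length).length : Int)) = 0 := by
      rw [List.length_range]; ring
    rw [hc0] at hsim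
    simp only [Nat.cast_zero] at hsim
    show PySem.List.pyGetD (solLoop pri ↑pri.length (List.replicate pri.length 0)
        (pri.foldl (fun pc p => PySem.List.pySetD pc p (PySem.List.pyGetD pc p 0 + 1))
          (List.replicate 10 0))
        0 0 ((PySem.List.max? pri (fun x => x)).getD 0) ((pri.length + 1) * (pri.length + 1))) loc 0
      = bLoop (PySem.List.enumerate pri 0) loc 0 (pri.length + 1)
    rw [hmx0, Option.getD_some, hqinit, hloceq, PySem.List.pyGetD_natCast]
    exact hsim
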